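-- pv_equiv track=rewrite | github.com/DReamLS/file_scanning | models/logic_search.py | find_possible_merge
-- ===== SOURCE A (Python) =====
-- def find_possible_merge(row, col, cell_map, max_row, max_col):
--     """查找包含指定位置的可能合并单元格"""
--     # 尝试向右扩展
--     end_col = col
--     while end_col < max_col and (row, end_col + 1) not in cell_map:
--         end_col += 1
--
--     # 尝试向下扩展
--     end_row = row
--     while end_row < max_row:
--         valid = True
--         for c in range(col, end_col + 1):
--             if (end_row + 1, c) in cell_map:
--                 valid = False
--                 break
--         if valid:
--             end_row += 1
--         else:
--             break
--
--     if end_row > row or end_col > col: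
--         return {
--             "start_row": row,
--             "start_col": col,
--             "end_row": end_row,
--             "end_col": end_col
--         }
--
--     return None
-- ===== SOURCE B (Python) =====
-- def find_possible_merge(row, col, cell_map, max_row, max_col):
--     # Single pass per axis: the nearest blocking cell determines each limit.
--     end_col = max_col
--     for r, c in cell_map:
--         if r == row and c > col:
--             end_col = min(end_col, c - 1)
--     end_col = max(end_col, col)
--
--     end_row = max_row
--     for r, c in cell_map:
--         if r > row and col <= c <= end_col:
--             end_row = min(end_row, r - 1)
--     end_row = max(end_row, row)
--
--     if end_row > row or end_col > col:
--         return {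
--             "start_row": row,
--             "start_col": col,
--             "end_row": end_row,
--             "end_col": end_col
--         }
--     return None
-- ===== Notes on version B (the rewrite author's own statement) =====
-- stated objective: faster
-- what changed: Replaces A's step-by-step while loops (right expansion cell-by-cell, down expansion re-scanning the whole column range per row) with a single pass over cell_map per axis that takes the minimum over blocking cells and clamps with max/min; intended as faster (measured ahead at every probed size, up to ~23x, unconfirmed at the largest).
import Mathlib
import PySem

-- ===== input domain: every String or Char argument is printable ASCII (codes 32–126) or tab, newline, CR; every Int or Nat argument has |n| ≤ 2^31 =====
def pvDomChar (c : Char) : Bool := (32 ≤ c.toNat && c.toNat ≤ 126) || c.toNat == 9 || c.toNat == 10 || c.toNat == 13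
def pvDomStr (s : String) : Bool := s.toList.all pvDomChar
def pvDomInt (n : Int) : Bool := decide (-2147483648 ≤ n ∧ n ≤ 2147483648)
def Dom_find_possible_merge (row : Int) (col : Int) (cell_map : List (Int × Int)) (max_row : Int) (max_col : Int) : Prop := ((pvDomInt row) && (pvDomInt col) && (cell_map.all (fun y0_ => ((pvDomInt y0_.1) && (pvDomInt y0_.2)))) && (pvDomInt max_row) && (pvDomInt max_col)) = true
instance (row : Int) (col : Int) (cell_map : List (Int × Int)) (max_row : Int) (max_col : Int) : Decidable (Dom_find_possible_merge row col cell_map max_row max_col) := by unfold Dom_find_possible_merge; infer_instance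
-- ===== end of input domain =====

-- B replaces A's step-by-step while loops (and the inner column re-scan per row) by one
-- pass over cell_map per axis, taking the minimum over blocking cells; intended as faster
-- (timing run measured B ahead at every size, up to ~23x, unconfirmed at the largest size).

-- ===== PORT A =====
-- inner 'for c in range(col, end_col+1): if (end_row+1, c) in cell_map: valid=False; break'
def aValid (cm : List (Int × Int)) (r : Int) : List Int → Bool
  | [] => true
  | c :: rest => if (r, c) ∈ cm then false else aValid cm r rest

-- 'while end_col < max_col and (row, end_col + 1) not in cell_map: end_col += 1'
def aRight (row : Int) (max_col : Int) (cm : List (Int × Int)) (e : Int) : Int :=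
  if _h : e < max_col ∧ (row, e + 1) ∉ cm then aRight row max_col cm (e + 1) else e
termination_by (max_col - e).toNat
decreasing_by omega

-- 'while end_row < max_row: valid = …; if valid: end_row += 1 else: break'
def aDown (col end_col max_row : Int) (cm : List (Int × Int)) (e : Int) : Int :=
  if _h : e < max_row ∧ aValid cm (e + 1) (PySem.List.pyRange col (end_col + 1) 1) = true then
    aDown col end_col max_row cm (e + 1)
  else e
termination_by (max_row - e).toNat
decreasing_by omega

def find_possible_merge (row : Int) (col : Int) (cell_map : List (Int × Int)) (max_row : Int) (max_col : Int) : Option (List (String × Int)) :=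
  let end_col := aRight row max_col cell_map col
  let end_row := aDown col end_col max_row cell_map row
  if end_row > row ∨ end_col > col then
    some [("start_row", row), ("start_col", col), ("end_row", end_row), ("end_col", end_col)]
  else none

-- ===== PORT B =====
def find_possible_merge_alt (row : Int) (col : Int) (cell_map : List (Int × Int)) (max_row : Int) (max_col : Int) : Option (List (String × Int)) :=
  let end_col :=
    max (cell_map.foldl (fun acc p => if p.1 == row && col < p.2 then min acc (p.2 - 1) else acc) max_col) col
  let end_row :=
    max (cell_map.foldl (fun acc p => if row < p.1 && col ≤ p.2 && p.2 ≤ end_col then min acc (p.1 - 1) else acc) max_row) row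
  if end_row > row ∨ end_col > col then
    some [("start_row", row), ("start_col", col), ("end_row", end_row), ("end_col", end_col)]
  else none

-- ===== PRECONDITION & SPEC =====
def Spec_find_possible_merge (row : Int) (col : Int) (cell_map : List (Int × Int)) (max_row : Int) (max_col : Int) (out : Option (List (String × Int))) : Prop := out = find_possible_merge_alt row col cell_map max_row max_col
instance (row : Int) (col : Int) (cell_map : List (Int × Int)) (max_row : Int) (max_col : Int) (out : Option (List (String × Int))) : Decidable (Spec_find_possible_merge row col cell_map max_row max_col out) := by unfold Spec_find_possible_merge; infer_instance

-- ===== CLAIM (what is proved, stated in full; the proofs are below) =====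
def Claim_equal_find_possible_merge : Prop := ∀ (row : Int) (col : Int) (cell_map : List (Int × Int)) (max_row : Int) (max_col : Int), Dom_find_possible_merge row col cell_map max_row max_col → Spec_find_possible_merge row col cell_map max_row max_col (find_possible_merge row col cell_map max_row max_col)

-- ===== LEMMAS AND PROOFS =====

-- Both end values are characterised by the same four properties, which pin them uniquely.
-- B is the "blocked" predicate for the axis being expanded.
def ExpProps (lo bound : Int) (B : Int → Prop) (e : Int) : Prop :=
  lo ≤ e ∧ e ≤ max lo bound ∧ (∀ c, lo < c → c ≤ e → ¬ B c) ∧ (e < bound → B (e + 1))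

theorem expProps_unique (lo bound : Int) (B : Int → Prop) (e₁ e₂ : Int)
    (h₁ : ExpProps lo bound B e₁) (h₂ : ExpProps lo bound B e₂) : e₁ = e₂ := by
  obtain ⟨l₁, u₁, n₁, s₁⟩ := h₁
  obtain ⟨l₂, u₂, n₂, s₂⟩ := h₂
  by_contra hne
  rcases lt_trichotomy e₁ e₂ with h | h | h
  · exact n₂ (e₁ + 1) (by omega) (by omega) (s₁ (by omega))
  · exact hne h
  · exact n₁ (e₂ + 1) (by omega) (by omega) (s₂ (by omega))

-- ---- generic fold-min characterisation ----
-- foldl (fun acc p => if q p then min acc (f p) else acc)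
theorem foldMin_le_init (q : Int × Int → Bool) (f : Int × Int → Int) :
    ∀ (cm : List (Int × Int)) (init : Int),
      cm.foldl (fun acc p => if q p then min acc (f p) else acc) init ≤ init := by
  intro cm
  induction cm with
  | nil => intro init; simp
  | cons p rest ih =>
    intro init
    simp only [List.foldl_cons]
    split
    · exact le_trans (ih _) (by omega)
    · exact ih init

theorem foldMin_le_mem (q : Int × Int → Bool) (f : Int × Int → Int) :
    ∀ (cm : List (Int × Int)) (init : Int) (p : Int × Int), p ∈ cm → q p = true →
      cm.foldl (fun acc p => if q p then min acc (f p) else acc) init ≤ f p := by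
  intro cm
  induction cm with
  | nil => intro _ p h; simp at h
  | cons a rest ih =>
    intro init p hp hq
    simp only [List.foldl_cons]
    rcases List.mem_cons.mp hp with h | h
    · subst h
      rw [if_pos hq]
      exact le_trans (foldMin_le_init q f rest _) (by omega)
    · split
      · exact ih _ p h hq
      · exact ih _ p h hq

theorem foldMin_cases (q : Int × Int → Bool) (f : Int × Int → Int) :
    ∀ (cm : List (Int × Int)) (init : Int),
      cm.foldl (fun acc p => if q p then min acc (f p) else acc) init = init ∨
      ∃ p ∈ cm, q p = true ∧ cm.foldl (fun acc p => if q p then min acc (f p) else acc) init = f p := by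
  intro cm
  induction cm with
  | nil => intro init; left; rfl
  | cons a rest ih =>
    intro init
    simp only [List.foldl_cons]
    by_cases hq : q a = true
    · rw [if_pos hq]
      rcases ih (min init (f a)) with h | ⟨p, hp, hqp, hv⟩
      · rcases (by omega : init ≤ f a ∨ f a < init) with hle | hlt
        · left; omega
        · right; exact ⟨a, List.mem_cons_self, hq, by omega⟩
      · right; exact ⟨p, List.mem_cons_of_mem _ hp, hqp, hv⟩
    · rw [if_neg hq]
      rcases ih init with h | ⟨p, hp, hqp, hv⟩
      · left; exact h
      · right; exact ⟨p, List.mem_cons_of_mem _ hp, hqp, hv⟩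

-- ---- the right-expansion ----

theorem aRight_props (row max_col : Int) (cm : List (Int × Int)) :
    ∀ e, ExpProps e max_col (fun c => (row, c) ∈ cm) (aRight row max_col cm e) := by
  intro e
  induction e using aRight.induct row max_col cm with
  | case1 e h ih =>
    rw [aRight, dif_pos h]
    obtain ⟨l, u, n, s⟩ := ih
    refine ⟨by omega, by omega, ?_, s⟩
    intro c hc hce
    rcases eq_or_lt_of_le (Int.add_one_le_iff.mpr hc) with hc1 | hc1
    · rw [← hc1]; exact h.2
    · exact n c (by omega) hce
  | case2 e h =>
    rw [aRight, dif_neg h]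
    refine ⟨le_refl e, le_max_left e max_col, by intro c h1 h2; omega, ?_⟩
    intro hlt
    by_contra hnm
    exact h ⟨hlt, hnm⟩

theorem bRight_props (row col max_col : Int) (cm : List (Int × Int)) :
    ExpProps col max_col (fun c => (row, c) ∈ cm)
      (max (cm.foldl (fun acc p => if p.1 == row && col < p.2 then min acc (p.2 - 1) else acc) max_col) col) := by
  set q : Int × Int → Bool := fun p => p.1 == row && col < p.2 with hq
  set f : Int × Int → Int := fun p => p.2 - 1 with hf
  set F := cm.foldl (fun acc p => if q p then min acc (f p) else acc) max_col with hF
  have hFinit : F ≤ max_col := foldMin_le_init q f cm max_col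
  refine ⟨by omega, by omega, ?_, ?_⟩
  · intro c hc hce hmem
    have : F ≤ c - 1 := by
      have := foldMin_le_mem q f cm max_col (row, c) hmem
        (by simp [hq]; omega)
      simpa [hf] using this
    omega
  · intro hlt
    rcases foldMin_cases q f cm max_col with h | ⟨p, hp, hqp, hv⟩
    · omega
    · have hq' : p.1 = row ∧ col < p.2 := by
        simpa [hq] using hqp
      have : max F col + 1 = p.2 := by
        have : F = p.2 - 1 := by simpa [hf] using hv
        omega
      rw [this]
      have : p = (row, p.2) := by
        ext
        · exact hq'.1
        · rfl
      rw [← this]; exact hp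

-- ---- the down-expansion ----

theorem aValid_iff (cm : List (Int × Int)) (r : Int) :
    ∀ l : List Int, aValid cm r l = true ↔ ∀ c ∈ l, (r, c) ∉ cm := by
  intro l
  induction l with
  | nil => simp [aValid]
  | cons c rest ih =>
    simp only [aValid]
    split
    · simp only [List.mem_cons]
      constructor
      · intro h; exact absurd h (by simp)
      · intro h; exact absurd (h c (Or.inl rfl)) (by simp_all)
    · rw [ih]
      constructor
      · intro h x hx
        rcases List.mem_cons.mp hx with h1 | h1
        · subst h1; assumption
        · exact h x h1
      · intro h x hx; exact h x (List.mem_cons_of_mem _ hx)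

-- blocked predicate for the down expansion
def BlkDown (col end_col : Int) (cm : List (Int × Int)) (r : Int) : Prop :=
  ∃ c, col ≤ c ∧ c ≤ end_col ∧ (r, c) ∈ cm

theorem aDown_cond_iff (col end_col : Int) (cm : List (Int × Int)) (r : Int) :
    aValid cm r (PySem.List.pyRange col (end_col + 1) 1) = true ↔ ¬ BlkDown col end_col cm r := by
  rw [aValid_iff]
  unfold BlkDown
  constructor
  · rintro h ⟨c, h1, h2, h3⟩
    exact h c (PySem.List.mem_pyRange_one.mpr ⟨h1, by omega⟩) h3
  · intro h c hc hmem
    obtain ⟨h1, h2⟩ := PySem.List.mem_pyRange_one.mp hc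
    exact h ⟨c, h1, by omega, hmem⟩

theorem aDown_props (col end_col max_row : Int) (cm : List (Int × Int)) :
    ∀ e, ExpProps e max_row (BlkDown col end_col cm) (aDown col end_col max_row cm e) := by
  intro e
  induction e using aDown.induct col end_col max_row cm with
  | case1 e h ih =>
    rw [aDown, dif_pos h]
    obtain ⟨l, u, n, s⟩ := ih
    refine ⟨by omega, by omega, ?_, s⟩
    intro c hc hce
    rcases eq_or_lt_of_le (Int.add_one_le_iff.mpr hc) with hc1 | hc1
    · rw [← hc1]; exact (aDown_cond_iff _ _ _ _).mp h.2
    · exact n c (by omega) hce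
  | case2 e h =>
    rw [aDown, dif_neg h]
    refine ⟨le_refl e, le_max_left e max_row, by intro c h1 h2; omega, ?_⟩
    intro hlt
    have hv : ¬ (aValid cm (e + 1) (PySem.List.pyRange col (end_col + 1) 1) = true) :=
      fun hv => h ⟨hlt, hv⟩
    by_contra hnb
    exact hv ((aDown_cond_iff _ _ _ _).mpr hnb)

theorem bDown_props (row col end_col max_row : Int) (cm : List (Int × Int)) :
    ExpProps row max_row (BlkDown col end_col cm)
      (max (cm.foldl (fun acc p => if row < p.1 && col ≤ p.2 && p.2 ≤ end_col then min acc (p.1 - 1) else acc) max_row) row) := by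
  set q : Int × Int → Bool := fun p => row < p.1 && col ≤ p.2 && p.2 ≤ end_col with hq
  set f : Int × Int → Int := fun p => p.1 - 1 with hf
  set F := cm.foldl (fun acc p => if q p then min acc (f p) else acc) max_row with hF
  have hFinit : F ≤ max_row := foldMin_le_init q f cm max_row
  refine ⟨by omega, by omega, ?_, ?_⟩
  · intro r hr hre ⟨c, h1, h2, h3⟩
    have : F ≤ r - 1 := by
      have := foldMin_le_mem q f cm max_row (r, c) h3 (by simp [hq]; omega)
      simpa [hf] using this
    omega
  · intro hlt
    rcases foldMin_cases q f cm max_row with h | ⟨p, hp, hqp, hv⟩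
    · omega
    · have hq' : (row < p.1 ∧ col ≤ p.2) ∧ p.2 ≤ end_col := by
        simpa [hq, and_assoc] using hqp
      have hFv : F = p.1 - 1 := by simpa [hf] using hv
      have hr : max F row + 1 = p.1 := by omega
      exact ⟨p.2, hq'.1.2, hq'.2, by rw [hr]; exact hp⟩

-- ===== VERDICT (by name: the statement is the Claim_ definition above) =====
theorem find_possible_merge_spec : Claim_equal_find_possible_merge := by
  intro row col cm max_row max_col _
  unfold Spec_find_possible_merge find_possible_merge find_possible_merge_alt
  have hcol : aRight row max_col cm col =
      max (cm.foldl (fun acc p => if p.1 == row && col < p.2 then min acc (p.2 - 1) else acc) max_col) col :=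
    expProps_unique col max_col _ _ _ (aRight_props row max_col cm col) (bRight_props row col max_col cm)
  have hrow : aDown col (aRight row max_col cm col) max_row cm row =
      max (cm.foldl (fun acc p => if row < p.1 && col ≤ p.2 && p.2 ≤ aRight row max_col cm col then min acc (p.1 - 1) else acc) max_row) row :=
    expProps_unique row max_row _ _ _ (aDown_props col (aRight row max_col cm col) max_row cm row)
      (bDown_props row col (aRight row max_col cm col) max_row cm)
  rw [hcol] at hrow
  simp only [hcol, hrow]
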